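-- pv_equiv track=rewrite | github.com/ogorodnikov/Pycheck | Complete/Bacteria Colonies/bacteria_colonies - Imported - contour, starmap.py | healthy
-- ===== SOURCE A (Python) =====
-- from itertools import chain, product, starmap
--
-- def healthy(grid, default=(0, 0), diffs=((-1, 0), (1, 0), (0, -1), (0, 1))):
--     cells = product(*map(range, map(len, (grid, grid[0]))))
--     bacteria = {(r, c) for r, c in cells if grid[r][c] == 1}
--
--     around = lambda r, c: {(r + y, c + x) for y, x in diffs}
--     contour = lambda shape: set(chain(*starmap(around, shape))) - shape
--
--     def getsize(cell):
--         shape, size = {cell}, 0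
--         while contour(shape) <= bacteria:
--             shape |= contour(shape)
--             size += 1
--         return 0 if contour(shape) & bacteria else size
--
--     if not bacteria: return default
--     center = max(bacteria, key=getsize)
--     return center if getsize(center) else default
-- ===== SOURCE B (Python) =====
-- def healthy(grid, default=(0, 0), diffs=((-1, 0), (1, 0), (0, -1), (0, 1))):
--     rows, cols = len(grid), len(grid[0])
--     cells = [(r, c) for r in range(rows) for c in range(cols) if grid[r][c] == 1]
--     if not cells:
--         return default
--     bacteria = set(cells)
--     def key(cell):
--         # growth is translation-invariant: work with origin-centered offsets and
--         # grow only the frontier (last layer) instead of re-scanning a whole shape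
--         r, c = cell
--         frontier, seen, k = {(0, 0)}, {(0, 0)}, 0
--         while True:
--             frontier = {(y + dy, x + dx) for (y, x) in frontier for (dy, dx) in diffs} - seen
--             if all((r + y, c + x) in bacteria for (y, x) in frontier):
--                 seen |= frontier
--                 k += 1
--             else:
--                 return 0 if any((r + y, c + x) in bacteria for (y, x) in frontier) else k
--     best, best_size = default, 0
--     for cell in cells:
--         s = key(cell)
--         if s > best_size:
--             best, best_size = cell, s
--     return best
-- ===== Notes on version B (the rewrite author's own statement) =====
-- stated objective: alternative
-- what changed: A regrows a per-cell shape set and recomputes the whole contour from scratch (twice) on every growth step and re-evaluates the key for the chosen center; B works with origin-centered offsets (growth is translation-invariant), extends only the previous frontier layer per step, and tracks the running argmax in one pass.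
import Mathlib
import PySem

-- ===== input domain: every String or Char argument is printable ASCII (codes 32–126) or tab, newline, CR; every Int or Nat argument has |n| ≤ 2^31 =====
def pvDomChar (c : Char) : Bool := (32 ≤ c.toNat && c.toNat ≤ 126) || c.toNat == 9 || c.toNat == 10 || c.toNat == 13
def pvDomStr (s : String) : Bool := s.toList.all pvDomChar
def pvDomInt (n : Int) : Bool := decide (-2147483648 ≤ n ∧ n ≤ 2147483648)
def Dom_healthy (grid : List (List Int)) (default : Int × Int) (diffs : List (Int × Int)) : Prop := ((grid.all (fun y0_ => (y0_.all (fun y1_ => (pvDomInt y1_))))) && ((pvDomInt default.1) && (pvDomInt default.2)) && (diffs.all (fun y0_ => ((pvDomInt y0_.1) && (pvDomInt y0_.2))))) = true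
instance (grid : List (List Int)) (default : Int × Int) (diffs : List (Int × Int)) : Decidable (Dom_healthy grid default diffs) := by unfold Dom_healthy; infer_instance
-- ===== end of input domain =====

-- B replaces A's per-cell shape regrowth (full contour recomputed each step) by origin-centered
-- frontier-only growth per cell with a single-pass running argmax (alternative decomposition).

-- ===== PORT A =====
def pvAround (diffs : List (Int × Int)) (p : Int × Int) : List (Int × Int) :=
  diffs.map (fun d => (p.1 + d.1, p.2 + d.2))

def pvContour (diffs : List (Int × Int)) (shape : PySem.Set (Int × Int)) : PySem.Set (Int × Int) :=
  PySem.Set.diff (PySem.Set.ofList (shape.flatMap (pvAround diffs))) shape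

-- Python's 'while contour(shape) <= bacteria' has no bound; fuel bact.length+1 is enough whenever
-- the Python loop terminates (shape is a strictly growing Nodup subset of bacteria; see pvMain below).
def pvALoop (bact : PySem.Set (Int × Int)) (diffs : List (Int × Int)) :
    Nat → PySem.Set (Int × Int) → Int → PySem.Set (Int × Int) × Int
  | 0, shape, size => (shape, size)
  | m + 1, shape, size =>
    if PySem.Set.issubset (pvContour diffs shape) bact then
      pvALoop bact diffs m (PySem.Set.union shape (pvContour diffs shape)) (size + 1)
    else (shape, size)

def pvGetsize (bact : PySem.Set (Int × Int)) (diffs : List (Int × Int)) (cell : Int × Int) : Int :=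
  let r := pvALoop bact diffs (bact.length + 1) (PySem.Set.ofList [cell]) 0
  if PySem.Set.inter (pvContour diffs r.1) bact ≠ [] then 0 else r.2

def healthy (grid : List (List Int)) (default : Int × Int) (diffs : List (Int × Int)) : Int × Int :=
  let rows : Int := grid.length
  -- grid[0]: IndexError on [] — outside Pre_healthy
  let cols : Int := (((PySem.List.pyGet? grid 0).getD [] : List Int).length : Int)
  let cells := (PySem.List.pyRange 0 rows 1).flatMap
    (fun r => (PySem.List.pyRange 0 cols 1).map (fun c => (r, c)))
  let bacteria : PySem.Set (Int × Int) :=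
    PySem.Set.ofList (cells.filter (fun rc =>
      PySem.List.pyGetD (PySem.List.pyGetD grid rc.1 []) rc.2 0 == 1))
  if bacteria = [] then default
  else
    let center := (PySem.List.max? bacteria (pvGetsize bacteria diffs)).getD default
    if pvGetsize bacteria diffs center ≠ 0 then center else default

-- ===== PORT B =====
def pvNbrs (diffs : List (Int × Int)) (ps : List (Int × Int)) : List (Int × Int) :=
  ps.flatMap (fun p => diffs.map (fun d => (p.1 + d.1, p.2 + d.2)))

-- Source B's per-cell 'while True' growth over (frontier, seen, k); Python's loop is unbounded,
-- fuel bact.length + 1 is enough whenever it terminates (cf. pvMain below)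
def pvBGrow (bact : PySem.Set (Int × Int)) (diffs : List (Int × Int)) (r c : Int) :
    Nat → PySem.Set (Int × Int) → PySem.Set (Int × Int) → Int → Int
  | 0, _, _, k => k
  | m + 1, f, seen, k =>
    let nf := PySem.Set.diff (PySem.Set.ofList (pvNbrs diffs f)) seen
    if nf.all (fun v => PySem.Set.contains bact (r + v.1, c + v.2)) then
      pvBGrow bact diffs r c m nf (PySem.Set.union seen nf) (k + 1)
    else if nf.any (fun v => PySem.Set.contains bact (r + v.1, c + v.2)) then 0 else k

def pvKeyB (bact : PySem.Set (Int × Int)) (diffs : List (Int × Int)) (cell : Int × Int) : Int :=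
  pvBGrow bact diffs cell.1 cell.2 (bact.length + 1)
    [((0 : Int), (0 : Int))] [((0 : Int), (0 : Int))] 0

def healthy_alt (grid : List (List Int)) (default : Int × Int) (diffs : List (Int × Int)) : Int × Int :=
  let rows : Int := grid.length
  let cols : Int := (((PySem.List.pyGet? grid 0).getD [] : List Int).length : Int)
  let cells := ((PySem.List.pyRange 0 rows 1).flatMap
    (fun r => (PySem.List.pyRange 0 cols 1).map (fun c => (r, c)))).filter (fun rc =>
      PySem.List.pyGetD (PySem.List.pyGetD grid rc.1 []) rc.2 0 == 1)
  if cells = [] then default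
  else
    let bacteria : PySem.Set (Int × Int) := PySem.Set.ofList cells
    (cells.foldl (fun acc cell =>
      let s := pvKeyB bacteria diffs cell
      if s > acc.2 then (cell, s) else acc) (default, 0)).1

-- ===== PRECONDITION & SPEC =====
-- spec-level helpers for Pre_ only (independent of both ports):
def pvPreCells (grid : List (List Int)) : List (Int × Int) :=
  ((PySem.List.pyRange 0 (grid.length : Int) 1).flatMap
    (fun r => (PySem.List.pyRange 0 ((grid.headD []).length : Int) 1).map (fun c => (r, c)))).filter
    (fun rc => PySem.List.pyGetD (PySem.List.pyGetD grid rc.1 []) rc.2 0 == 1)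

-- ball of growth radius k around the origin (offsets reachable in ≤ k steps along diffs)
def pvPreBall (diffs : List (Int × Int)) : Nat → PySem.Set (Int × Int)
  | 0 => [((0 : Int), (0 : Int))]
  | k + 1 =>
    let b := pvPreBall diffs k
    PySem.Set.update b (b.flatMap (fun p => diffs.map (fun d => (p.1 + d.1, p.2 + d.2))))

-- the colony key of a bacteria cell c: its fully-bacterial growth radius if isolated, else 0
def pvPreKey (b : List (Int × Int)) (diffs : List (Int × Int)) (c : Int × Int) : Int :=
  let grows : Nat → Bool := fun k =>
    (pvPreBall diffs k).all (fun v => b.contains (c.1 + v.1, c.2 + v.2))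
  let s := ((List.range (b.length + 1)).filter grows).length - 1
  if (PySem.Set.diff (pvPreBall diffs (s + 1)) (pvPreBall diffs s)).any
      (fun v => b.contains (c.1 + v.1, c.2 + v.2)) then 0
  else (s : Int)

def pvPreTie (b : List (Int × Int)) (diffs : List (Int × Int)) : Bool :=
  let m := b.foldl (fun a c => max a (pvPreKey b diffs c)) 0
  m == 0 || (b.filter (fun c => pvPreKey b diffs c == m)).length == 1

-- Pre_ excludes: an empty grid or a row shorter than row 0 (A raises IndexError); a bacteria-bearing
-- grid with no diff other than (0,0) (A's while loop never terminates); and grids whose maximal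
-- positive colony key is attained by more than one cell, where A's returned center is an accident
-- of CPython's set-iteration (hash) order.
def Pre_healthy (grid : List (List Int)) (default : Int × Int) (diffs : List (Int × Int)) : Prop :=
  grid ≠ [] ∧
  (∀ row ∈ grid, (grid.headD []).length ≤ row.length) ∧
  (pvPreCells grid ≠ [] →
    (∃ d ∈ diffs, d ≠ ((0 : Int), (0 : Int))) ∧ pvPreTie (pvPreCells grid) diffs = true)
instance (grid : List (List Int)) (default : Int × Int) (diffs : List (Int × Int)) : Decidable (Pre_healthy grid default diffs) := by unfold Pre_healthy; infer_instance

def pvWitness_healthy : List (List Int) × (Int × Int) × (List (Int × Int)) :=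
  ([[1]], (0, 0), [(-1, 0), (1, 0), (0, -1), (0, 1)])

def Spec_healthy (grid : List (List Int)) (default : Int × Int) (diffs : List (Int × Int)) (out : Int × Int) : Prop := out = healthy_alt grid default diffs
instance (grid : List (List Int)) (default : Int × Int) (diffs : List (Int × Int)) (out : Int × Int) : Decidable (Spec_healthy grid default diffs out) := by unfold Spec_healthy; infer_instance

-- ===== CLAIM (what is proved, stated in full; the proofs are below) =====
def Claim_equal_healthy : Prop := ∀ (grid : List (List Int)) (default : Int × Int) (diffs : List (Int × Int)), Dom_healthy grid default diffs → Pre_healthy grid default diffs → Spec_healthy grid default diffs (healthy grid default diffs)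

-- ===== LEMMAS AND PROOFS =====
lemma mem_pvContour (diffs : List (Int × Int)) (shape : PySem.Set (Int × Int)) (y : Int × Int) :
    y ∈ pvContour diffs shape ↔
      ((∃ p ∈ shape, ∃ d ∈ diffs, y = (p.1 + d.1, p.2 + d.2)) ∧ y ∉ shape) := by
  simp [pvContour, PySem.Set.mem_diff, PySem.Set.mem_ofList, List.mem_flatMap, pvAround,
    List.mem_map, eq_comm]

lemma mem_pvNbrsSet (diffs : List (Int × Int)) (f seen : PySem.Set (Int × Int)) (z : Int × Int) :
    z ∈ PySem.Set.diff (PySem.Set.ofList (pvNbrs diffs f)) seen ↔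
      ((∃ p ∈ f, ∃ d ∈ diffs, z = (p.1 + d.1, p.2 + d.2)) ∧ z ∉ seen) := by
  simp [PySem.Set.mem_diff, PySem.Set.mem_ofList, pvNbrs, List.mem_flatMap, List.mem_map, eq_comm]

lemma exists_max_key {α : Type} (l : List α) (h : l ≠ []) (φ : α → Int) :
    ∃ p ∈ l, ∀ q ∈ l, φ q ≤ φ p := by
  induction l with
  | nil => exact absurd rfl h
  | cons x t ih =>
    rcases t with _ | ⟨y, t'⟩
    · exact ⟨x, List.mem_singleton_self x, by simp⟩
    · obtain ⟨p, hp, hmax⟩ := ih (by simp)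
      by_cases hc : φ p ≤ φ x
      · refine ⟨x, List.mem_cons_self, ?_⟩
        intro q hq
        rcases List.mem_cons.mp hq with rfl | hq'
        · exact le_refl _
        · exact le_trans (hmax q hq') hc
      · refine ⟨p, List.mem_cons_of_mem _ hp, ?_⟩
        intro q hq
        rcases List.mem_cons.mp hq with rfl | hq'
        · omega
        · exact hmax q hq'

lemma pvContour_nonempty (diffs : List (Int × Int)) (d0 : Int × Int) (hd0 : d0 ∈ diffs)
    (hd0n : d0 ≠ ((0 : Int), (0 : Int))) (shape : PySem.Set (Int × Int)) (hne : shape ≠ []) :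
    ∃ y, y ∈ pvContour diffs shape := by
  obtain ⟨p, hp, hmax⟩ := exists_max_key shape hne (fun q => q.1 * d0.1 + q.2 * d0.2)
  refine ⟨(p.1 + d0.1, p.2 + d0.2), (mem_pvContour _ _ _).mpr ⟨⟨p, hp, d0, hd0, rfl⟩, ?_⟩⟩
  intro hmem
  have hle := hmax _ hmem
  simp only at hle
  have hpos : 0 < d0.1 * d0.1 + d0.2 * d0.2 := by
    by_cases h1 : d0.1 = 0
    · have h2 : d0.2 ≠ 0 := by
        intro h2; exact hd0n (Prod.ext h1 h2)
      nlinarith [mul_self_pos.mpr h2, mul_self_nonneg d0.1]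
    · nlinarith [mul_self_pos.mpr h1, mul_self_nonneg d0.2]
  nlinarith [hle]

lemma nodup_length_le {α : Type} [DecidableEq α] (l₁ l₂ : List α) (h : l₁.Nodup)
    (hs : ∀ x ∈ l₁, x ∈ l₂) : l₁.length ≤ l₂.length := by
  have h1 : l₁.toFinset.card = l₁.length := List.toFinset_card_of_nodup h
  have h2 : l₁.toFinset ⊆ l₂.toFinset := by
    intro a ha; simp only [List.mem_toFinset] at *; exact hs a ha
  have h3 := Finset.card_le_card h2
  have h4 := l₂.toFinset_card_le
  omega

lemma pvMain (bact diffs : List (Int × Int)) (d0 : Int × Int) (hd0 : d0 ∈ diffs)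
    (hd0n : d0 ≠ ((0 : Int), (0 : Int))) (c : Int × Int) :
    ∀ (m : Nat) (shape f p : List (Int × Int)) (size : Int),
    shape.Nodup → shape ≠ [] →
    (∀ y ∈ shape, y ∈ bact) →
    (∀ y : Int × Int, y ∈ shape ↔ (y.1 - c.1, y.2 - c.2) ∈ p) →
    (∀ z ∈ f, z ∈ p) →
    (∀ z ∈ p, z ∉ f → ∀ d ∈ diffs, (z.1 + d.1, z.2 + d.2) ∈ p) →
    bact.length + 1 ≤ m + shape.length →
    (if PySem.Set.inter (pvContour diffs (pvALoop bact diffs m shape size).1) bact ≠ [] then 0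
     else (pvALoop bact diffs m shape size).2)
    = pvBGrow bact diffs c.1 c.2 m f p size := by
  intro m
  induction m with
  | zero =>
    intro shape f p size h1 h2 h3 h4 h5 h6 h7
    exact absurd h7 (by
      have := nodup_length_le shape bact h1 h3
      omega)
  | succ m ih =>
    intro shape f p size h1 h2 h3 h4 h5 h6 h7
    set nf := PySem.Set.diff (PySem.Set.ofList (pvNbrs diffs f)) p with hnf
    -- membership correspondence between A's contour and B's next layer
    have corr : ∀ y : Int × Int, y ∈ pvContour diffs shape ↔ (y.1 - c.1, y.2 - c.2) ∈ nf := by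
      intro y
      rw [hnf, mem_pvContour, mem_pvNbrsSet]
      constructor
      · rintro ⟨⟨q, hq, d, hd, hyq⟩, hout⟩
        obtain ⟨e1, e2⟩ := Prod.ext_iff.mp hyq
        simp only at e1 e2
        rw [show ((y.1 - c.1, y.2 - c.2) : Int × Int) = (q.1 + d.1 - c.1, q.2 + d.2 - c.2) from by
          simp only [Prod.mk.injEq]; omega]
        have hqp : (q.1 - c.1, q.2 - c.2) ∈ p := (h4 q).mp hq
        have hyp : ((q.1 + d.1) - c.1, (q.2 + d.2) - c.2) ∉ p := by
          intro hc
          refine hout ?_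
          rw [show y = ((q.1 + d.1, q.2 + d.2) : Int × Int) from Prod.ext e1 e2]
          exact (h4 _).mpr (by simpa using hc)
        by_cases hqf : (q.1 - c.1, q.2 - c.2) ∈ f
        · exact ⟨⟨_, hqf, d, hd, by simp only [Prod.mk.injEq]; omega⟩, by simpa using hyp⟩
        · refine absurd ?_ hyp
          have := h6 _ hqp hqf d hd
          rw [show ((q.1 + d.1 - c.1, q.2 + d.2 - c.2) : Int × Int)
              = (q.1 - c.1 + d.1, q.2 - c.2 + d.2) from by simp only [Prod.mk.injEq]; omega]
          exact this
      · rintro ⟨⟨z, hz, d, hd, hy⟩, hnp⟩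
        obtain ⟨hy1, hy2⟩ := Prod.ext_iff.mp hy
        simp only at hy1 hy2
        have hzp : z ∈ p := h5 z hz
        have hcz : ((c.1 + z.1, c.2 + z.2) : Int × Int) ∈ shape := by
          refine (h4 _).mpr ?_
          rw [show ((c.1 + z.1 - c.1, c.2 + z.2 - c.2) : Int × Int) = (z.1, z.2) from by
            simp only [Prod.mk.injEq]; omega]
          exact hzp
        refine ⟨⟨(c.1 + z.1, c.2 + z.2), hcz, d, hd, ?_⟩, ?_⟩
        · simp only [Prod.ext_iff]
          constructor <;> omega
        · intro hyS; exact hnp ((h4 y).mp hyS)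
    have transNf : ∀ v : Int × Int, v ∈ nf →
        ((c.1 + v.1, c.2 + v.2) : Int × Int) ∈ pvContour diffs shape := by
      intro v hv
      refine (corr (c.1 + v.1, c.2 + v.2)).mpr ?_
      rw [show ((((c.1 + v.1, c.2 + v.2) : Int × Int)).1 - c.1,
          (((c.1 + v.1, c.2 + v.2) : Int × Int)).2 - c.2) = (v.1, v.2) from by
        simp only [Prod.mk.injEq]; omega]
      exact hv
    -- the two loop tests agree
    have condIff : (PySem.Set.issubset (pvContour diffs shape) bact = true) ↔
        (nf.all (fun v => PySem.Set.contains bact (c.1 + v.1, c.2 + v.2)) = true) := by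
      rw [PySem.Set.issubset_iff, List.all_eq_true]
      constructor
      · intro h v hv
        have := h _ (transNf v hv)
        simpa [PySem.Set.contains_iff] using this
      · intro h y hy
        have := h _ ((corr y).mp hy)
        simp only [PySem.Set.contains_iff] at this
        rw [show ((c.1 + (y.1 - c.1), c.2 + (y.2 - c.2)) : Int × Int) = (y.1, y.2) from by
          simp only [Prod.mk.injEq]; omega, Prod.mk.eta] at this
        exact this
    by_cases hc : PySem.Set.issubset (pvContour diffs shape) bact = true
    · have eqA : pvALoop bact diffs (m + 1) shape size
          = pvALoop bact diffs m (PySem.Set.union shape (pvContour diffs shape)) (size + 1) := by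
        rw [pvALoop, if_pos hc]
      have eqB : pvBGrow bact diffs c.1 c.2 (m + 1) f p size
          = pvBGrow bact diffs c.1 c.2 m nf (PySem.Set.union p nf) (size + 1) := by
        rw [pvBGrow, ← hnf, if_pos (condIff.mp hc)]
      rw [eqA, eqB]
      refine ih (PySem.Set.union shape (pvContour diffs shape)) nf (PySem.Set.union p nf)
        (size + 1) ?_ ?_ ?_ ?_ ?_ ?_ ?_
      · exact PySem.Set.nodup_union _ _ h1
      · obtain ⟨y, hy⟩ := List.exists_mem_of_ne_nil shape h2
        exact List.ne_nil_of_mem ((PySem.Set.mem_union _ _ y).mpr (Or.inl hy))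
      · intro y hy
        rcases (PySem.Set.mem_union _ _ y).mp hy with h | h
        · exact h3 y h
        · exact (PySem.Set.issubset_iff _ _).mp hc y h
      · intro y
        rw [PySem.Set.mem_union, PySem.Set.mem_union]
        exact or_congr (h4 y) (corr y)
      · intro z hz
        exact (PySem.Set.mem_union _ _ z).mpr (Or.inr hz)
      · intro z hz hznf d hd
        rcases (PySem.Set.mem_union _ _ z).mp hz with hzp | hzn
        · by_cases hzf : z ∈ f
          · by_cases hpp : ((z.1 + d.1, z.2 + d.2) : Int × Int) ∈ p
            · exact (PySem.Set.mem_union _ _ _).mpr (Or.inl hpp)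
            · refine (PySem.Set.mem_union _ _ _).mpr (Or.inr ?_)
              rw [hnf, mem_pvNbrsSet]
              exact ⟨⟨z, hzf, d, hd, rfl⟩, hpp⟩
          · exact (PySem.Set.mem_union _ _ _).mpr (Or.inl (h6 z hzp hzf d hd))
        · exact absurd hzn hznf
      · obtain ⟨y, hy⟩ := pvContour_nonempty diffs d0 hd0 hd0n shape h2
        have hyns : y ∉ shape := ((mem_pvContour _ _ _).mp hy).2
        have hulen : shape.length + 1 ≤ (PySem.Set.union shape (pvContour diffs shape)).length := by
          show _ ≤ (PySem.Set.update shape (pvContour diffs shape)).length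
          rw [PySem.Set.update_eq_append_filter, List.length_append]
          have hyf : y ∈ (PySem.Set.ofList (pvContour diffs shape)).filter
              (fun v => !PySem.Set.contains shape v) := by
            rw [List.mem_filter]
            exact ⟨(PySem.Set.mem_ofList _ _).mpr hy,
              by simp [hyns]⟩
          have := List.length_pos_of_mem hyf
          omega
        omega
    · have eqA : pvALoop bact diffs (m + 1) shape size = (shape, size) := by
        rw [pvALoop, if_neg hc]
      have eqB : pvBGrow bact diffs c.1 c.2 (m + 1) f p size
          = (if nf.any (fun v => PySem.Set.contains bact (c.1 + v.1, c.2 + v.2)) then 0 else size) := by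
        rw [pvBGrow, ← hnf, if_neg (fun hb => hc (condIff.mpr hb))]
      rw [eqA, eqB]
      have interIff : (PySem.Set.inter (pvContour diffs shape) bact ≠ []) ↔
          ((nf.any fun v => PySem.Set.contains bact (c.1 + v.1, c.2 + v.2)) = true) := by
        constructor
        · intro h
          obtain ⟨y, hy⟩ := List.exists_mem_of_ne_nil _ h
          obtain ⟨hyc, hyb⟩ := (PySem.Set.mem_inter _ _ y).mp hy
          rw [List.any_eq_true]
          refine ⟨(y.1 - c.1, y.2 - c.2), (corr y).mp hyc, ?_⟩
          rw [show ((c.1 + (y.1 - c.1, y.2 - c.2).1, c.2 + (y.1 - c.1, y.2 - c.2).2) : Int × Int)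
            = (y.1, y.2) from by simp only [Prod.mk.injEq]; omega, Prod.mk.eta]
          rw [PySem.Set.contains_iff]
          exact hyb
        · intro h
          rw [List.any_eq_true] at h
          obtain ⟨v, hv, hcont⟩ := h
          refine List.ne_nil_of_mem ((PySem.Set.mem_inter _ _ _).mpr
            ⟨transNf v hv, ?_⟩)
          rw [PySem.Set.contains_iff] at hcont
          exact hcont
      simp only
      split_ifs with hA hB hB
      · rfl
      · exact absurd (interIff.mp hA) hB
      · exact absurd (interIff.mpr hB) hA
      · rfl

lemma pvALoop_size_le (bact : PySem.Set (Int × Int)) (diffs : List (Int × Int)) :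
    ∀ (m : Nat) (shape : PySem.Set (Int × Int)) (size : Int),
      size ≤ (pvALoop bact diffs m shape size).2 := by
  intro m
  induction m with
  | zero => intro shape size; simp [pvALoop]
  | succ m ih =>
    intro shape size
    simp only [pvALoop]
    split_ifs with h
    · exact le_trans (by omega) (ih _ (size + 1))
    · simp

lemma pvGetsize_nonneg (bact : PySem.Set (Int × Int)) (diffs : List (Int × Int)) (cell : Int × Int) :
    0 ≤ pvGetsize bact diffs cell := by
  simp only [pvGetsize]
  split_ifs with h
  · simp
  · exact pvALoop_size_le bact diffs _ _ 0

lemma pvGetsize_eq_keyB (bact diffs : List (Int × Int)) (d0 : Int × Int) (hd0 : d0 ∈ diffs)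
    (hd0n : d0 ≠ ((0 : Int), (0 : Int))) (cell : Int × Int) (hcell : cell ∈ bact) :
    pvGetsize bact diffs cell = pvKeyB bact diffs cell := by
  have hmain := pvMain bact diffs d0 hd0 hd0n cell (bact.length + 1) [cell]
    ([((0 : Int), (0 : Int))] : List (Int × Int)) ([((0 : Int), (0 : Int))] : List (Int × Int)) 0
    (List.nodup_singleton cell) (by simp) (by simpa using hcell)
    (by
      intro y
      simp only [List.mem_singleton, Prod.ext_iff]
      constructor
      · rintro ⟨e1, e2⟩
        constructor <;> omega
      · rintro ⟨e1, e2⟩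
        constructor <;> omega)
    (by intro z hz; exact hz)
    (by intro z hz hznf; exact absurd hz hznf)
    (by omega)
  have hsingle : PySem.Set.ofList [cell] = [cell] :=
    PySem.Set.ofList_eq_self_of_nodup _ (List.nodup_singleton cell)
  simp only [pvGetsize, pvKeyB, hsingle]
  exact hmain

lemma pvScanFold (f g : Int × Int → Int) (default : Int × Int) :
    ∀ (xs : List (Int × Int)), (∀ x ∈ xs, f x = g x) → (∀ x ∈ xs, 0 ≤ f x) →
    ∀ (m : Int × Int), 0 ≤ f m →
    xs.foldl (fun acc cell =>
        if g cell > acc.2 then (cell, g cell) else acc) ((if f m = 0 then default else m), f m)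
    = ((if f (xs.foldl (fun b x => if f b < f x then x else b) m) = 0 then default
        else xs.foldl (fun b x => if f b < f x then x else b) m),
       f (xs.foldl (fun b x => if f b < f x then x else b) m)) := by
  intro xs
  induction xs with
  | nil => intro _ _ m hm; rfl
  | cons x t ih =>
    intro hfg hf m hm
    have hg : g x = f x := (hfg x List.mem_cons_self).symm
    simp only [List.foldl_cons]
    by_cases hlt : f m < f x
    · rw [show ((if g x > (if f m = 0 then default else m, f m).2 then (x, g x)
          else (if f m = 0 then default else m, f m)) : (Int × Int) × Int)
          = ((if f x = 0 then default else x), f x) from by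
        rw [hg]
        have hx0 : ¬ f x = 0 := by
          have := hf x List.mem_cons_self; omega
        rw [if_pos (by simpa using hlt), if_neg hx0],
        if_pos hlt]
      exact ih (fun y hy => hfg y (List.mem_cons_of_mem _ hy))
        (fun y hy => hf y (List.mem_cons_of_mem _ hy)) x (hf x List.mem_cons_self)
    · rw [show ((if g x > (if f m = 0 then default else m, f m).2 then (x, g x)
          else (if f m = 0 then default else m, f m)) : (Int × Int) × Int)
          = ((if f m = 0 then default else m), f m) from by
        rw [hg, if_neg (by simpa using hlt)],
        if_neg hlt]
      exact ih (fun y hy => hfg y (List.mem_cons_of_mem _ hy))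
        (fun y hy => hf y (List.mem_cons_of_mem _ hy)) m hm

lemma pvMaxFold {α : Type} (key : α → Int) (x : α) (t : List α) :
    PySem.List.max? (x :: t) key = some (t.foldl (fun b y => if key b < key y then y else b) x) := by
  have aux : ∀ (l : List α) (m : α),
      l.foldl (fun acc y => match acc with
        | none => some y
        | some m => if key m < key y then some y else some m) (some m)
      = some (l.foldl (fun b y => if key b < key y then y else b) m) := by
    intro l
    induction l with
    | nil => intro m; rfl
    | cons z l' ih =>
      intro m
      simp only [List.foldl_cons]
      split_ifs with h
      · exact ih z
      · exact ih m
  show List.foldl _ none (x :: t) = _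
  rw [List.foldl_cons]
  exact aux t x

lemma pvPyGet0 (l : List (List Int)) : ((PySem.List.pyGet? l 0).getD [] : List Int) = l.headD [] := by
  cases l with
  | nil => rfl
  | cons x xs => simp [PySem.List.pyGet?, PySem.List.pyIdx?]

lemma pvRowsNodup (cols : Int) : ∀ (rs : List Int), rs.Nodup →
    (rs.flatMap (fun r => (PySem.List.pyRange 0 cols 1).map (fun c => ((r, c) : Int × Int)))).Nodup := by
  intro rs
  induction rs with
  | nil => intro _; simp
  | cons r t ih =>
    intro h
    obtain ⟨hr, ht⟩ := List.nodup_cons.mp h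
    rw [List.flatMap_cons]
    refine List.Nodup.append ?_ (ih ht) ?_
    · refine List.Nodup.map ?_ (PySem.List.nodup_pyRange_one 0 cols)
      intro a b hab
      simpa using congrArg Prod.snd hab
    · intro a ha hb
      obtain ⟨ca, hca, hae⟩ := List.mem_map.mp ha
      obtain ⟨r', hr', hb'⟩ := List.mem_flatMap.mp hb
      obtain ⟨c', hc', hbe⟩ := List.mem_map.mp hb'
      have e1 : r = r' := by
        have h1 := congrArg Prod.fst hae
        have h2 := congrArg Prod.fst hbe
        simp only at h1 h2
        rw [← h1] at h2
        exact h2.symm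
      exact hr (e1 ▸ hr')

-- ===== VERDICT (by name: the statement is the Claim_ definition above) =====
theorem healthy_spec : Claim_equal_healthy := by
  intro grid default diffs hdom hpre
  unfold Spec_healthy
  unfold Pre_healthy at hpre
  obtain ⟨hg, hrows, hrest⟩ := hpre
  show healthy grid default diffs = healthy_alt grid default diffs
  simp only [healthy, healthy_alt]
  set cells := ((PySem.List.pyRange 0 ((grid.length : Nat) : Int) 1).flatMap
    (fun r => (PySem.List.pyRange 0 ((((PySem.List.pyGet? grid 0).getD [] : List Int).length : Nat) : Int) 1).map
      (fun c => ((r, c) : Int × Int)))).filter (fun rc =>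
      PySem.List.pyGetD (PySem.List.pyGetD grid rc.1 []) rc.2 0 == 1) with hcells
  have hnd : cells.Nodup := by
    rw [hcells]
    exact List.Nodup.filter _
      (pvRowsNodup _ _ (PySem.List.nodup_pyRange_one 0 ((grid.length : Nat) : Int)))
  have hofl : PySem.Set.ofList cells = cells := PySem.Set.ofList_eq_self_of_nodup cells hnd
  have hprecells : pvPreCells grid = cells := by
    rw [hcells, pvPreCells, pvPyGet0]
  rw [hofl]
  clear_value cells
  rcases cells with _ | ⟨x, t⟩
  · rfl
  · have hne : (x :: t) ≠ ([] : List (Int × Int)) := List.cons_ne_nil x t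
    rw [if_neg hne, if_neg hne]
    obtain ⟨⟨d0, hd0, hd0n⟩, -⟩ := hrest (hprecells ▸ hne)
    rw [pvMaxFold (pvGetsize (x :: t) diffs) x t, Option.getD_some]
    set f := pvGetsize (x :: t) diffs with hfdef
    set g := pvKeyB (x :: t) diffs with hgdef
    have hkey : ∀ y ∈ (x :: t), f y = g y := fun y hy =>
      pvGetsize_eq_keyB (x :: t) diffs d0 hd0 hd0n y hy
    have hpos : ∀ y ∈ (x :: t), 0 ≤ f y := fun y _ => pvGetsize_nonneg (x :: t) diffs y
    rw [List.foldl_cons]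
    have hinit : (if g x > ((default, 0) : (Int × Int) × Int).2 then (x, g x) else (default, 0))
        = ((if f x = 0 then default else x), f x) := by
      simp only [← hkey x List.mem_cons_self]
      have h0 := hpos x List.mem_cons_self
      by_cases hx : f x = 0
      · rw [if_neg (by omega), if_pos hx, hx]
      · rw [if_pos (by omega), if_neg hx]
    rw [hinit, pvScanFold f g default t (fun y hy => hkey y (List.mem_cons_of_mem _ hy))
      (fun y hy => hpos y (List.mem_cons_of_mem _ hy)) x (hpos x List.mem_cons_self)]
    by_cases hm : f (t.foldl (fun b y => if f b < f y then y else b) x) = 0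
    · simp [hm]
    · simp [hm]
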